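-- pv_equiv track=rewrite | github.com/GaspardMerten/sncb-frequency-map | logic/reachability.py | build_reverse_timetable_graph
-- ===== SOURCE A (Python) =====
-- from collections import defaultdict
--
-- def build_reverse_timetable_graph(station_departures: dict) -> dict:
--     """Build a reverse timetable graph for backward-time BFS.
--
--     The forward graph has: station -> [(dep_min, next_station, arr_min, trip_id), ...]
--     The reverse graph has: station -> [(arr_min, prev_station, dep_min, trip_id), ...]
--     sorted by arr_min DESCENDING (latest first) for backward search.
--
--     This lets us answer "from which stations can you reach station X by time T?"
--     by running a backward BFS from the destination.
--     """
--     reverse: dict[str, list] = defaultdict(list)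
--
--     for station, departures in station_departures.items():
--         for dep_min, next_station, arr_min, trip_id in departures:
--             # In reverse: arriving at next_station means we came from station
--             reverse[next_station].append((arr_min, station, dep_min, trip_id))
--
--     # Sort by arr_min descending (we search backward in time)
--     for sid in reverse:
--         reverse[sid].sort(key=lambda x: x[0], reverse=True)
--
--     return dict(reverse)
-- ===== SOURCE B (Python) =====
-- def build_reverse_timetable_graph(station_departures: dict) -> dict:
--     # Flatten every edge reversed, sort the flat list once (stable, arr_min
--     # descending), then distribute into per-station lists already in order.
--     flat = [(next_station, (arr_min, station, dep_min, trip_id))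
--             for station, departures in station_departures.items()
--             for dep_min, next_station, arr_min, trip_id in departures]
--     reverse: dict = {}
--     for next_station, _ in flat:
--         reverse.setdefault(next_station, [])
--     flat.sort(key=lambda e: e[1][0], reverse=True)
--     for next_station, edge in flat:
--         reverse[next_station].append(edge)
--     return reverse
-- ===== Notes on version B (the rewrite author's own statement) =====
-- stated objective: alternative
-- what changed: B flattens all reversed edges into one list, stably sorts it once globally by arr_min descending, and distributes edges into per-station buckets (keys pre-created in first-appearance order), instead of A's bucket-first-then-sort-each-bucket scheme.
import Mathlib
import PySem

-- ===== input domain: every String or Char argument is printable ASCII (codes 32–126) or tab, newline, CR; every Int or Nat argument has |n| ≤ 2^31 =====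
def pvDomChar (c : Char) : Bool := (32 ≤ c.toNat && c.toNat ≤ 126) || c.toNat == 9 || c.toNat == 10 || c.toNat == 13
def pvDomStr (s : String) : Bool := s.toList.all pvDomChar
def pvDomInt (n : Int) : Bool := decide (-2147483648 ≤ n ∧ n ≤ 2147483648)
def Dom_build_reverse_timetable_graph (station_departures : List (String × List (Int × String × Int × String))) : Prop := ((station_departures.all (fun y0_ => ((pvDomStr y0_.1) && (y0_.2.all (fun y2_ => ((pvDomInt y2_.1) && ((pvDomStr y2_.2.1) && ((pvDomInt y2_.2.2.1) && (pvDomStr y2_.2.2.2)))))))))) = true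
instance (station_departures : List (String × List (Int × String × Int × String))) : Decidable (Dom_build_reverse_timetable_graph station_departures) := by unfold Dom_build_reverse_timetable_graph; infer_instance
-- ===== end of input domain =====

-- ===== PORT A =====
-- B flattens all reversed edges, sorts once globally (stable, arr_min descending)
-- and distributes; A buckets first and sorts each bucket ('alternative' decomposition).
def build_reverse_timetable_graph (station_departures : List (String × List (Int × String × Int × String))) : List (String × List (Int × String × Int × String)) :=
  let reverse1 : PySem.Dict String (List (Int × String × Int × String)) :=
    station_departures.foldl (fun d p =>
      p.2.foldl (fun d q =>
        d.modify q.2.1 [] (fun v => v ++ [(q.2.2.1, p.1, q.1, q.2.2.2)])) d)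
      PySem.Dict.empty
  let reverse2 :=
    reverse1.keys.foldl (fun d sid =>
      d.modify sid [] (fun v => PySem.List.sorted v (fun x => x.1) true)) reverse1
  reverse2.items

-- ===== PORT B =====
def build_reverse_timetable_graph_alt (station_departures : List (String × List (Int × String × Int × String))) : List (String × List (Int × String × Int × String)) :=
  let flat : List (String × (Int × String × Int × String)) :=
    station_departures.flatMap (fun p =>
      p.2.map (fun q => (q.2.1, (q.2.2.1, p.1, q.1, q.2.2.2))))
  let reverse0 : PySem.Dict String (List (Int × String × Int × String)) :=
    flat.foldl (fun d e => d.setdefault e.1 []) PySem.Dict.empty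
  let flatS := PySem.List.sorted flat (fun e => e.2.1) true
  let final := flatS.foldl (fun d e => d.modify e.1 [] (fun v => v ++ [e.2])) reverse0
  final.items

-- ===== PRECONDITION & SPEC =====
def Spec_build_reverse_timetable_graph (station_departures : List (String × List (Int × String × Int × String))) (out : List (String × List (Int × String × Int × String))) : Prop := out = build_reverse_timetable_graph_alt station_departures
instance (station_departures : List (String × List (Int × String × Int × String))) (out : List (String × List (Int × String × Int × String))) : Decidable (Spec_build_reverse_timetable_graph station_departures out) := by unfold Spec_build_reverse_timetable_graph; infer_instance

-- ===== CLAIM (what is proved, stated in full; the proofs are below) =====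
def Claim_equal_build_reverse_timetable_graph : Prop := ∀ (station_departures : List (String × List (Int × String × Int × String))), Dom_build_reverse_timetable_graph station_departures → Spec_build_reverse_timetable_graph station_departures (build_reverse_timetable_graph station_departures)

-- ===== LEMMAS AND PROOFS =====

abbrev pvEdge : Type := Int × String × Int × String
abbrev pvE : Type := String × pvEdge
abbrev pvD : Type := PySem.Dict String (List pvEdge)

def pvStep (d : pvD) (e : pvE) : pvD := d.modify e.1 [] (fun v => v ++ [e.2])
def pvSetd (d : pvD) (e : pvE) : pvD := d.setdefault e.1 []
def pvFlat (sd : List (String × List pvEdge)) : List pvE :=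
  sd.flatMap (fun p => p.2.map (fun q => (q.2.1, (q.2.2.1, p.1, q.1, q.2.2.2))))
def pvCollect (l : List pvE) (k : String) : List pvEdge :=
  (l.filter (fun e => e.1 == k)).map Prod.snd

lemma pv_nested_eq_flat (sd : List (String × List pvEdge)) (d0 : pvD) :
    sd.foldl (fun d p =>
      p.2.foldl (fun d q =>
        d.modify q.2.1 [] (fun v => v ++ [(q.2.2.1, p.1, q.1, q.2.2.2)])) d) d0
    = (pvFlat sd).foldl pvStep d0 := by
  induction sd generalizing d0 with
  | nil => rfl
  | cons p t ih =>
    simp only [pvFlat, List.flatMap_cons, List.foldl_cons, List.foldl_append, List.foldl_map]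
    rw [show (pvFlat t) = t.flatMap (fun p => p.2.map (fun q => (q.2.1, (q.2.2.1, p.1, q.1, q.2.2.2)))) from rfl] at ih
    rw [ih]
    rfl

lemma pv_get?_stepFold (l : List pvE) (d0 : pvD) (k : String) :
    (l.foldl pvStep d0).get? k =
      match d0.get? k with
      | some v => some (v ++ pvCollect l k)
      | none => if k ∈ l.map Prod.fst then some (pvCollect l k) else none := by
  induction l generalizing d0 with
  | nil =>
    simp only [List.foldl_nil, pvCollect, List.filter_nil, List.map_nil, List.map_nil]
    cases h : d0.get? k <;> simp
  | cons e t ih =>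
    simp only [List.foldl_cons]
    rw [ih]
    have hstep : (pvStep d0 e).get? k =
        if k = e.1 then some (d0.getD e.1 [] ++ [e.2]) else d0.get? k := by
      simp [pvStep, PySem.Dict.modify, PySem.Dict.get?_insert]
    rw [hstep]
    by_cases hk : k = e.1
    · subst hk
      simp only [if_pos rfl, pvCollect, List.filter_cons, beq_self_eq_true, if_pos,
        List.map_cons, List.map_cons, PySem.Dict.getD]
      cases h : d0.get? e.1 <;> simp [h]
    · have hne : (e.1 == k) = false := by simp [Ne.symm hk]
      simp only [if_neg hk, pvCollect, List.filter_cons, hne, Bool.false_eq_true,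
        if_false, List.map_cons, List.mem_cons]
      cases h : d0.get? k <;>
        by_cases hm : k ∈ List.map Prod.fst t <;> simp [h, hm, hk]

lemma pv_contains_eq_keys_any (d : pvD) (k : String) :
    d.contains k = d.keys.any (· == k) := by
  simp only [PySem.Dict.contains, PySem.Dict.keys, List.any_map]
  rfl

lemma pv_keys_step_eq_setd (l : List pvE) (d1 d2 : pvD) (h : d1.keys = d2.keys) :
    (l.foldl pvStep d1).keys = (l.foldl pvSetd d2).keys := by
  induction l generalizing d1 d2 with
  | nil => simpa using h
  | cons e t ih =>
    simp only [List.foldl_cons]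
    apply ih
    have hc : d1.contains e.1 = d2.contains e.1 := by
      rw [pv_contains_eq_keys_any, pv_contains_eq_keys_any, h]
    by_cases hc1 : d1.contains e.1 = true
    · have hc2 : d2.contains e.1 = true := by rw [← hc]; exact hc1
      rw [show pvStep d1 e = d1.insert e.1 (d1.getD e.1 [] ++ [e.2]) from rfl]
      rw [PySem.Dict.keys_insert_of_contains _ _ hc1]
      simp [pvSetd, PySem.Dict.setdefault, hc2, h]
    · have hc1' : d1.contains e.1 = false := by simpa using hc1
      have hc2 : d2.contains e.1 = false := by rw [← hc]; exact hc1'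
      rw [show pvStep d1 e = d1.insert e.1 (d1.getD e.1 [] ++ [e.2]) from rfl]
      rw [PySem.Dict.keys_insert_of_not_contains _ _ hc1']
      simp only [pvSetd, PySem.Dict.setdefault, hc2, Bool.false_eq_true, if_false,
        PySem.Dict.keys, List.map_append]
      simpa [PySem.Dict.keys] using h

lemma pv_keys_stepFold_of_contains (l : List pvE) (d : pvD)
    (h : ∀ e ∈ l, d.contains e.1 = true) :
    (l.foldl pvStep d).keys = d.keys := by
  induction l generalizing d with
  | nil => rfl
  | cons e t ih =>
    simp only [List.foldl_cons]
    have hc : d.contains e.1 = true := h e (List.mem_cons_self ..)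
    have hkeys : (pvStep d e).keys = d.keys := by
      rw [show pvStep d e = d.insert e.1 (d.getD e.1 [] ++ [e.2]) from rfl]
      exact PySem.Dict.keys_insert_of_contains _ _ hc
    rw [ih (pvStep d e) ?_, hkeys]
    intro x hx
    rw [show pvStep d e = d.insert e.1 (d.getD e.1 [] ++ [e.2]) from rfl,
      PySem.Dict.contains_insert]
    simp [h x (List.mem_cons_of_mem _ hx)]

lemma pv_contains_setdFold (l : List pvE) (d : pvD) (k : String) :
    (l.foldl pvSetd d).contains k = (d.contains k || decide (k ∈ l.map Prod.fst)) := by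
  induction l generalizing d with
  | nil => simp
  | cons e t ih =>
    simp only [List.foldl_cons]
    rw [ih]
    have hsd : (pvSetd d e).contains k = (d.contains k || (e.1 == k)) := by
      by_cases hc : d.contains e.1 = true
      · simp only [pvSetd, PySem.Dict.setdefault, hc, if_pos rfl]
        by_cases hk : k = e.1
        · subst hk; simp [hc]
        · simp [Ne.symm hk]
      · have hc' : d.contains e.1 = false := by simpa using hc
        simp only [pvSetd, PySem.Dict.setdefault, hc', Bool.false_eq_true, if_false]
        simp [PySem.Dict.contains, List.any_append]
    rw [hsd]
    by_cases hk : k = e.1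
    · subst hk; simp
    · have hne : (e.1 == k) = false := by simp [Ne.symm hk]
      by_cases hm : k ∈ List.map Prod.fst t <;> simp [hne, hm, hk]

lemma pv_get?_setdFold (l : List pvE) (d : pvD) (k : String) :
    (l.foldl pvSetd d).get? k =
      match d.get? k with
      | some v => some v
      | none => if k ∈ l.map Prod.fst then some ([] : List pvEdge) else none := by
  induction l generalizing d with
  | nil => cases h : d.get? k <;> simp [h]
  | cons e t ih =>
    simp only [List.foldl_cons]
    rw [ih]
    have hsd : (pvSetd d e) = if d.contains e.1 = true then d else d.insert e.1 [] := by
      simp only [pvSetd, PySem.Dict.setdefault, PySem.Dict.insert]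
      split_ifs with h1 <;> simp_all
    rw [hsd]
    by_cases hc : d.contains e.1 = true
    · rw [if_pos hc]
      cases h : d.get? k with
      | some v => simp [h]
      | none =>
        by_cases hk : k = e.1
        · subst hk
          rw [PySem.Dict.get?_eq_none_iff_contains] at h
          rw [h] at hc; simp at hc
        · by_cases hm : k ∈ List.map Prod.fst t <;> simp [h, hm, hk]
    · have hc' : d.contains e.1 = false := by simpa using hc
      have hnone : d.get? e.1 = none := (PySem.Dict.get?_eq_none_iff_contains _ _).2 hc'
      rw [if_neg hc, PySem.Dict.get?_insert]
      by_cases hk : k = e.1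
      · subst hk; simp [hnone]
      · simp only [if_neg hk]
        cases h : d.get? k with
        | some v => simp [h]
        | none => by_cases hm : k ∈ List.map Prod.fst t <;> simp [h, hm, hk]

lemma pv_nodup_keys_stepFold (l : List pvE) (d : pvD) (h : d.keys.Nodup) :
    (l.foldl pvStep d).keys.Nodup := by
  induction l generalizing d with
  | nil => exact h
  | cons e t ih =>
    simp only [List.foldl_cons]
    exact ih _ (PySem.Dict.nodup_keys_insert _ _ _ h)

lemma pv_get?_sortFold_not_mem (f : List pvEdge → List pvEdge) (ks : List String)
    (d : pvD) (k : String) (h : k ∉ ks) :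
    (ks.foldl (fun d s => d.modify s [] f) d).get? k = d.get? k := by
  induction ks generalizing d with
  | nil => rfl
  | cons s t ih =>
    simp only [List.foldl_cons]
    rw [ih _ (fun hm => h (List.mem_cons_of_mem _ hm))]
    have hk : k ≠ s := fun he => h (he ▸ List.mem_cons_self ..)
    simp [PySem.Dict.modify, PySem.Dict.get?_insert, hk]

lemma pv_get?_sortFold_mem (f : List pvEdge → List pvEdge) (ks : List String)
    (d : pvD) (k : String) (hn : ks.Nodup) (hm : k ∈ ks) :
    (ks.foldl (fun d s => d.modify s [] f) d).get? k = some (f (d.getD k [])) := by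
  induction ks generalizing d with
  | nil => cases hm
  | cons s t ih =>
    simp only [List.foldl_cons]
    rcases List.mem_cons.1 hm with hk | hk
    · subst hk
      rw [pv_get?_sortFold_not_mem _ _ _ _ (by simpa using (List.nodup_cons.1 hn).1)]
      simp [PySem.Dict.modify, PySem.Dict.get?_insert]
    · have hks : k ≠ s := by
        rintro rfl; exact (List.nodup_cons.1 hn).1 hk
      rw [ih _ (List.nodup_cons.1 hn).2 hk]
      simp [PySem.Dict.modify, PySem.Dict.getD, PySem.Dict.get?_insert, hks]

lemma pv_insertBy_cons_of_forall {α : Type} (b : α → α → Bool) (x : α) (ys : List α)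
    (h : ∀ z ∈ ys, b x z = true) :
    PySem.List.insertBy b x ys = x :: ys := by
  cases ys with
  | nil => rfl
  | cons y t => simp [PySem.List.insertBy, h y (List.mem_cons_self ..)]

lemma pv_map_insertBy {α β : Type} (f : α → β) (b : α → α → Bool) (b' : β → β → Bool)
    (h : ∀ a c, b a c = b' (f a) (f c)) (x : α) (ys : List α) :
    (PySem.List.insertBy b x ys).map f = PySem.List.insertBy b' (f x) (ys.map f) := by
  induction ys with
  | nil => rfl
  | cons y t ih =>
    by_cases hb : b x y = true
    · rw [show PySem.List.insertBy b x (y :: t) = x :: y :: t from by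
        simp [PySem.List.insertBy, hb]]
      simp only [List.map_cons]
      rw [show PySem.List.insertBy b' (f x) (f y :: t.map f)
          = f x :: f y :: t.map f from by simp [PySem.List.insertBy, ← h, hb]]
    · have hb' : b x y = false := by simpa using hb
      rw [show PySem.List.insertBy b x (y :: t) = y :: PySem.List.insertBy b x t from by
        simp [PySem.List.insertBy, hb']]
      simp only [List.map_cons]
      rw [show PySem.List.insertBy b' (f x) (f y :: t.map f)
          = f y :: PySem.List.insertBy b' (f x) (t.map f) from by
        simp [PySem.List.insertBy, ← h, hb'], ih]

lemma pv_map_sorted_rev {α β : Type} (f : α → β) (key : β → Int) (xs : List α) :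
    (PySem.List.sorted xs (fun x => key (f x)) true).map f
      = PySem.List.sorted (xs.map f) key true := by
  have aux : ∀ (l : List α) (acc : List α),
      (l.foldl (fun a x => PySem.List.insertBy (fun a c => decide (key (f c) < key (f a))) x a) acc).map f
        = (l.map f).foldl (fun a x => PySem.List.insertBy (fun a c => decide (key c < key a)) x a) (acc.map f) := by
    intro l
    induction l with
    | nil => intro acc; rfl
    | cons x t ih =>
      intro acc
      simp only [List.foldl_cons, List.map_cons]
      rw [← pv_map_insertBy f _ _ (fun a c => rfl), ih]
  rw [PySem.List.sorted_rev_eq_foldl_insertBy, PySem.List.sorted_rev_eq_foldl_insertBy]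
  exact aux xs []

lemma pv_filter_insertBy {α : Type} (key : α → Int) (p : α → Bool) (x : α) (ys : List α)
    (h : ys.Pairwise (fun a c => key c ≤ key a)) :
    (PySem.List.insertBy (fun a c => decide (key c < key a)) x ys).filter p
      = if p x then PySem.List.insertBy (fun a c => decide (key c < key a)) x (ys.filter p)
        else ys.filter p := by
  induction ys with
  | nil => by_cases hp : p x <;> simp [PySem.List.insertBy, hp]
  | cons y t ih =>
    obtain ⟨hy, ht⟩ := List.pairwise_cons.1 h
    by_cases hb : decide (key y < key x) = true
    · rw [show PySem.List.insertBy (fun a c => decide (key c < key a)) x (y :: t)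
          = x :: y :: t from by simp [PySem.List.insertBy, hb]]
      by_cases hp : p x
      · have hall : ∀ z ∈ List.filter p (y :: t),
            (fun a c => decide (key c < key a)) x z = true := by
          intro z hz
          have hzm : z ∈ y :: t := List.mem_of_mem_filter hz
          have hzy : key z ≤ key y := by
            rcases List.mem_cons.1 hzm with rfl | hz'
            · exact le_refl _
            · exact hy z hz'
          have : key y < key x := of_decide_eq_true hb
          simp only [decide_eq_true_iff]
          omega
        rw [show List.filter p (x :: y :: t) = x :: List.filter p (y :: t) from by
            simp [List.filter_cons, hp],
          pv_insertBy_cons_of_forall _ _ _ hall, if_pos hp]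
      · simp [List.filter_cons, hp]
    · have hb' : decide (key y < key x) = false := by simpa using hb
      rw [show PySem.List.insertBy (fun a c => decide (key c < key a)) x (y :: t)
          = y :: PySem.List.insertBy (fun a c => decide (key c < key a)) x t from by
        simp [PySem.List.insertBy, hb']]
      simp only [List.filter_cons]
      by_cases hpy : p y
      · rw [if_pos hpy, if_pos hpy, ih ht]
        by_cases hp : p x
        · rw [if_pos hp, if_pos hp,
            show PySem.List.insertBy (fun a c => decide (key c < key a)) x
                (y :: List.filter p t)
              = y :: PySem.List.insertBy (fun a c => decide (key c < key a)) x
                  (List.filter p t) from by simp [PySem.List.insertBy, hb']]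
        · rw [if_neg hp, if_neg hp]
      · rw [if_neg hpy, if_neg hpy, ih ht]

lemma pv_filter_sorted_rev {α : Type} (key : α → Int) (p : α → Bool) (xs : List α) :
    (PySem.List.sorted xs key true).filter p
      = PySem.List.sorted (xs.filter p) key true := by
  have hsf : ∀ (l : List α) (z : α),
      PySem.List.sorted (l ++ [z]) key true
        = PySem.List.insertBy (fun a c => decide (key c < key a)) z
            (PySem.List.sorted l key true) := by
    intro l z
    rw [PySem.List.sorted_rev_eq_foldl_insertBy, PySem.List.sorted_rev_eq_foldl_insertBy,
      List.foldl_append]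
    rfl
  induction xs using List.reverseRecOn with
  | nil => rfl
  | append_singleton xs x ih =>
    rw [hsf, pv_filter_insertBy key p x _ (PySem.List.sorted_pairwise_rev xs key),
      List.filter_append]
    by_cases hp : p x
    · rw [if_pos hp, ih, show List.filter p [x] = [x] from by simp [hp], hsf]
    · rw [if_neg hp, ih, show List.filter p [x] = ([] : List α) from by simp [hp],
        List.append_nil]

lemma pv_collect_sorted (flat : List pvE) (k : String) :
    pvCollect (PySem.List.sorted flat (fun e => e.2.1) true) k
      = PySem.List.sorted (pvCollect flat k) (fun x => x.1) true := by
  unfold pvCollect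
  rw [pv_filter_sorted_rev]
  exact pv_map_sorted_rev Prod.snd (fun x : pvEdge => x.1) _

lemma pv_items_ext (d1 d2 : pvD) (hk : d1.keys = d2.keys) (hn : d1.keys.Nodup)
    (hg : ∀ k ∈ d1.keys, d1.get? k = d2.get? k) : d1.items = d2.items := by
  have hn2 : d2.keys.Nodup := hk ▸ hn
  have hlen : d1.items.length = d2.items.length := by
    have := congrArg List.length hk
    simpa [PySem.Dict.keys] using this
  apply List.ext_getElem hlen
  intro i h1 h2
  have hfst : (d1.items[i]).1 = (d2.items[i]).1 := by
    have := List.getElem_of_eq hk (by simpa [PySem.Dict.keys] using h1)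
    simpa [PySem.Dict.keys] using this
  have hmem1 : ((d1.items[i]).1, (d1.items[i]).2) ∈ d1.items := by
    simpa using List.getElem_mem h1
  have hmem2 : ((d2.items[i]).1, (d2.items[i]).2) ∈ d2.items := by
    simpa using List.getElem_mem h2
  have g1 : d1.get? (d1.items[i]).1 = some ((d1.items[i]).2) :=
    PySem.Dict.get?_of_mem_items _ hmem1 hn
  have g2 : d2.get? (d2.items[i]).1 = some ((d2.items[i]).2) :=
    PySem.Dict.get?_of_mem_items _ hmem2 hn2
  have hkmem : (d1.items[i]).1 ∈ d1.keys := by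
    simp only [PySem.Dict.keys]
    exact List.mem_map_of_mem hmem1
  have hsnd : (d1.items[i]).2 = (d2.items[i]).2 := by
    have := hg _ hkmem
    rw [g1, hfst, g2] at this
    exact Option.some.inj this
  exact Prod.ext hfst hsnd

lemma pv_keys_sortFold_of_contains (f : List pvEdge → List pvEdge) (ks : List String)
    (d : pvD) (h : ∀ s ∈ ks, d.contains s = true) :
    (ks.foldl (fun d s => d.modify s [] f) d).keys = d.keys := by
  induction ks generalizing d with
  | nil => rfl
  | cons s t ih =>
    simp only [List.foldl_cons]
    have hc : d.contains s = true := h s (List.mem_cons_self ..)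
    have hkeys : (d.modify s [] f).keys = d.keys := by
      rw [PySem.Dict.keys_modify]
      exact PySem.Dict.keys_insert_of_contains _ _ hc
    rw [ih _ ?_, hkeys]
    intro x hx
    rw [PySem.Dict.contains_modify]
    simp [h x (List.mem_cons_of_mem _ hx)]

lemma pv_main (sd : List (String × List pvEdge)) :
    build_reverse_timetable_graph sd = build_reverse_timetable_graph_alt sd := by
  have hA : build_reverse_timetable_graph sd
      = (((pvFlat sd).foldl pvStep PySem.Dict.empty).keys.foldl
          (fun d sid => d.modify sid [] (fun v => PySem.List.sorted v (fun x => x.1) true))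
          ((pvFlat sd).foldl pvStep PySem.Dict.empty)).items := by
    unfold build_reverse_timetable_graph
    rw [pv_nested_eq_flat sd PySem.Dict.empty]
  have hB : build_reverse_timetable_graph_alt sd
      = ((PySem.List.sorted (pvFlat sd) (fun e => e.2.1) true).foldl pvStep
          ((pvFlat sd).foldl pvSetd PySem.Dict.empty)).items := rfl
  rw [hA, hB]
  have hnodupA : ((pvFlat sd).foldl pvStep PySem.Dict.empty).keys.Nodup :=
    pv_nodup_keys_stepFold _ _ PySem.Dict.nodup_keys_empty
  have hkeys0 : ((pvFlat sd).foldl pvStep PySem.Dict.empty).keys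
      = ((pvFlat sd).foldl pvSetd PySem.Dict.empty).keys :=
    pv_keys_step_eq_setd _ _ _ rfl
  have hcont0 : ∀ k, ((pvFlat sd).foldl pvSetd PySem.Dict.empty).contains k
      = decide (k ∈ (pvFlat sd).map Prod.fst) := by
    intro k
    rw [pv_contains_setdFold]
    simp [PySem.Dict.contains_empty]
  have hkeysA : (((pvFlat sd).foldl pvStep PySem.Dict.empty).keys.foldl
        (fun d sid => d.modify sid [] (fun v => PySem.List.sorted v (fun x => x.1) true))
        ((pvFlat sd).foldl pvStep PySem.Dict.empty)).keys
      = ((pvFlat sd).foldl pvStep PySem.Dict.empty).keys := by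
    apply pv_keys_sortFold_of_contains
    intro s hs
    exact (PySem.Dict.contains_iff_mem_keys _ _).2 hs
  have hkeysB : ((PySem.List.sorted (pvFlat sd) (fun e => e.2.1) true).foldl pvStep
        ((pvFlat sd).foldl pvSetd PySem.Dict.empty)).keys
      = ((pvFlat sd).foldl pvSetd PySem.Dict.empty).keys := by
    apply pv_keys_stepFold_of_contains
    intro e he
    rw [hcont0]
    have : e ∈ pvFlat sd := (PySem.List.mem_sorted _ _ _ _).1 he
    simp only [decide_eq_true_iff]
    exact List.mem_map_of_mem this
  apply pv_items_ext
  · rw [hkeysA, hkeysB, hkeys0]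
  · rw [hkeysA]; exact hnodupA
  · intro k hkmem
    rw [hkeysA] at hkmem
    have hc : ((pvFlat sd).foldl pvStep PySem.Dict.empty).contains k = true :=
      (PySem.Dict.contains_iff_mem_keys _ _).2 hkmem
    have hkflat : k ∈ (pvFlat sd).map Prod.fst := by
      by_contra hnm
      have hz := pv_get?_stepFold (pvFlat sd) PySem.Dict.empty k
      rw [PySem.Dict.get?_empty] at hz
      simp only [hnm, if_false] at hz
      rw [PySem.Dict.get?_eq_none_iff_contains] at hz
      rw [hz] at hc
      exact Bool.false_ne_true hc
    have hgA0 : ((pvFlat sd).foldl pvStep PySem.Dict.empty).get? k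
        = some (pvCollect (pvFlat sd) k) := by
      have hz := pv_get?_stepFold (pvFlat sd) PySem.Dict.empty k
      rw [PySem.Dict.get?_empty] at hz
      simpa [hkflat] using hz
    have hgA : (((pvFlat sd).foldl pvStep PySem.Dict.empty).keys.foldl
          (fun d sid => d.modify sid [] (fun v => PySem.List.sorted v (fun x => x.1) true))
          ((pvFlat sd).foldl pvStep PySem.Dict.empty)).get? k
        = some (PySem.List.sorted (pvCollect (pvFlat sd) k) (fun x => x.1) true) := by
      rw [pv_get?_sortFold_mem _ _ _ _ hnodupA hkmem]
      simp [PySem.Dict.getD, hgA0]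
    have hg0 : ((pvFlat sd).foldl pvSetd PySem.Dict.empty).get? k = some [] := by
      have hz := pv_get?_setdFold (pvFlat sd) PySem.Dict.empty k
      rw [PySem.Dict.get?_empty] at hz
      simpa [hkflat] using hz
    have hgB : ((PySem.List.sorted (pvFlat sd) (fun e => e.2.1) true).foldl pvStep
          ((pvFlat sd).foldl pvSetd PySem.Dict.empty)).get? k
        = some (pvCollect (PySem.List.sorted (pvFlat sd) (fun e => e.2.1) true) k) := by
      have hz := pv_get?_stepFold (PySem.List.sorted (pvFlat sd) (fun e => e.2.1) true)
        ((pvFlat sd).foldl pvSetd PySem.Dict.empty) k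
      rw [hg0] at hz
      simpa using hz
    rw [hgA, hgB, pv_collect_sorted]

-- ===== VERDICT (by name: the statement is the Claim_ definition above) =====
theorem build_reverse_timetable_graph_spec : Claim_equal_build_reverse_timetable_graph := by
  intro sd _
  exact pv_main sd
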